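-- pv_equiv track=rewrite | github.com/Matsiri-blip/Honours-Project | ramsey_algorithms/classical_algorithm.py | get_clique_edge_indices
-- ===== SOURCE A (Python) =====
-- from itertools import combinations
--
-- def total_edges(num_vertices):                         #total edges function,
--   return int((num_vertices**2-num_vertices)/2)                    # returns total edges of a graph
--
-- def get_clique_edge_indices(num_vertices,a_sized_clique):
--   num_qubits = total_edges(num_vertices)
--   edges = list(combinations(range(num_vertices), 2))                       ##define edges in graph
--   edge_to_index = {edge: i for i, edge in enumerate(edges)}               ##map each edge to a number
--   a_cliques = list(combinations(range(num_vertices),a_sized_clique))   ##choose different way of selecting subgraphs of size 'a_clique_size'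
--   a_clique_indices = []                                                     ##initialize clique_indices list
--   for vertices in a_cliques:
--     subgraph_edges = list(combinations(vertices, 2))
--     indices = [edge_to_index[tuple(sorted(e))] for e in subgraph_edges]
--     a_clique_indices.append(indices)
--   return a_clique_indices
-- ===== SOURCE B (Python) =====
-- from itertools import combinations
--
-- def get_clique_edge_indices(num_vertices, a_sized_clique):
--     n = num_vertices
--     result = []
--     for vertices in combinations(range(n), a_sized_clique):
--         result.append([i * (n - 1) - i * (i - 1) // 2 + (j - i - 1)
--                        for i, j in combinations(vertices, 2)])
--     return result
-- ===== Notes on version B (the rewrite author's own statement) =====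
-- stated objective: alternative
-- what changed: B drops A's precomputed edge list and edge->index dictionary entirely and computes each edge's index with the closed-form combinatorial rank i*(n-1) - i*(i-1)//2 + (j-i-1), so no O(n^2) lookup table is built or consulted.
import Mathlib
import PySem

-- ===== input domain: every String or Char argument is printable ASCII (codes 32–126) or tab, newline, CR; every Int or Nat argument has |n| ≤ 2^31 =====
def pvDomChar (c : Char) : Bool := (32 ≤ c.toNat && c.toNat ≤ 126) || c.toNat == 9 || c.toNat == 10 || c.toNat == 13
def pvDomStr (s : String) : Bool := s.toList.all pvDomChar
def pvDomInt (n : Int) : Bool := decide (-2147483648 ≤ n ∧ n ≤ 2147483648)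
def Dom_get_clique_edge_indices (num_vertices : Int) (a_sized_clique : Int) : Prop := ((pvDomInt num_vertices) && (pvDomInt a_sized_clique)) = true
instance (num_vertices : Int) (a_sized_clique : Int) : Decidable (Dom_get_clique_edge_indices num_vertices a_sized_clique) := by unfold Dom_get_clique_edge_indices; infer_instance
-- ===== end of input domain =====

-- B replaces A's precomputed edge list + edge->index dict by the closed-form rank
-- i*(n-1) - i*(i-1)//2 + (j-i-1) of an edge (i,j), computed per pair (alternative decomposition).


-- itertools.combinations(xs, k) in lexicographic order (shared library helper, used by both Pythons)
def pvCombs (xs : List Int) (k : Nat) : List (List Int) :=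
  match k, xs with
  | 0, _ => [[]]
  | _ + 1, [] => []
  | k + 1, x :: rest => (pvCombs rest k).map (x :: ·) ++ pvCombs rest (k + 1)

-- ===== PORT A =====
-- A also computes num_qubits = total_edges(num_vertices) via float division; the value is
-- never used, so that binding is not ported.  The dict lookup edge_to_index[...] is ported
-- as getD with default 0; the key is always present on the admitted inputs (proved below).
def get_clique_edge_indices (num_vertices : Int) (a_sized_clique : Int) : List (List Int) :=
  let edges := pvCombs (PySem.List.pyRange 0 num_vertices 1) 2
  -- enumerate(edges) rendered as zip-with-index (equal to PySem.List.enumerate, proved below;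
  -- the zipIdx form is evaluable on large edge lists)
  let edge_to_index : PySem.Dict (List Int) Int :=
    (edges.zipIdx.map (fun q => ((q.2 : Int), q.1))).foldl
      (fun d p => d.insert p.2 p.1) PySem.Dict.empty
  let a_cliques := pvCombs (PySem.List.pyRange 0 num_vertices 1) a_sized_clique.toNat
  a_cliques.foldl (fun acc vertices =>
    acc ++ [(pvCombs vertices 2).map
      (fun e => edge_to_index.getD (PySem.List.sorted e (fun x => x) false) 0)]) []

-- ===== PORT B =====
-- the inexhaustive 'for i, j in combinations(vertices, 2)' destructuring: pairs always have
-- length 2, the '_' arm is unreachable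
def get_clique_edge_indices_alt (num_vertices : Int) (a_sized_clique : Int) : List (List Int) :=
  (pvCombs (PySem.List.pyRange 0 num_vertices 1) a_sized_clique.toNat).foldl
    (fun result vertices =>
      result ++ [(pvCombs vertices 2).map (fun e =>
        match e with
        | [i, j] => i * (num_vertices - 1) - PySem.Int.floordiv (i * (i - 1)) 2 + (j - i - 1)
        | _ => 0)]) []

-- ===== PRECONDITION & SPEC =====
-- Python's combinations(range(n), a) raises ValueError for negative a; that is the only
-- exception A can raise, so Pre_ is exactly 0 ≤ a_sized_clique.
def Pre_get_clique_edge_indices (num_vertices : Int) (a_sized_clique : Int) : Prop :=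
  0 ≤ a_sized_clique
instance (num_vertices : Int) (a_sized_clique : Int) : Decidable (Pre_get_clique_edge_indices num_vertices a_sized_clique) := by unfold Pre_get_clique_edge_indices; infer_instance

def pvWitness_get_clique_edge_indices : Int × Int := (4, 3)

def Spec_get_clique_edge_indices (num_vertices : Int) (a_sized_clique : Int) (out : List (List Int)) : Prop := out = get_clique_edge_indices_alt num_vertices a_sized_clique
instance (num_vertices : Int) (a_sized_clique : Int) (out : List (List Int)) : Decidable (Spec_get_clique_edge_indices num_vertices a_sized_clique out) := by unfold Spec_get_clique_edge_indices; infer_instance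

-- ===== CLAIM (what is proved, stated in full; the proofs are below) =====
def Claim_equal_get_clique_edge_indices : Prop := ∀ (num_vertices : Int) (a_sized_clique : Int), Dom_get_clique_edge_indices num_vertices a_sized_clique → Pre_get_clique_edge_indices num_vertices a_sized_clique → Spec_get_clique_edge_indices num_vertices a_sized_clique (get_clique_edge_indices num_vertices a_sized_clique)

-- ===== LEMMAS AND PROOFS =====

theorem pvCombs_one (xs : List Int) : pvCombs xs 1 = xs.map (fun x => [x]) := by
  induction xs with
  | nil => rfl
  | cons x rest ih => simp [pvCombs, ih]

theorem mem_pvCombs {l : List Int} {xs : List Int} {k : Nat}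
    (h : l ∈ pvCombs xs k) : l.Sublist xs ∧ l.length = k := by
  induction xs generalizing l k with
  | nil =>
    match k with
    | 0 => simp [pvCombs] at h; simp [h]
    | _ + 1 => simp [pvCombs] at h
  | cons x rest ih =>
    match k with
    | 0 => simp [pvCombs] at h; simp [h]
    | k + 1 =>
      simp only [pvCombs, List.mem_append, List.mem_map] at h
      rcases h with ⟨t, ht, rfl⟩ | h
      · obtain ⟨hs, hl⟩ := ih ht
        exact ⟨List.Sublist.cons₂ x hs, by simp [hl]⟩
      · obtain ⟨hs, hl⟩ := ih h
        exact ⟨hs.cons x, hl⟩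

-- THE POSITION LEMMA: in combinations(range(s,n),2), the pair [i,j] sits at the position p
-- with 2p = (i-s)(2n-s-i-1) + 2(j-i-1).
theorem pvCombs_two_pos : ∀ (m : Nat) (n s i j : Int) (p : Nat),
    (n - s).toNat ≤ m → s ≤ i → i < j → j < n →
    2 * (p : Int) = (i - s) * (2 * n - s - i - 1) + 2 * (j - i - 1) →
    (pvCombs (PySem.List.pyRange s n 1) 2)[p]? = some [i, j] := by
  intro m
  induction m with
  | zero => intro n s i j p hm hsi hij hjn hp; omega
  | succ m ih =>
    intro n s i j p hm hsi hij hjn hp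
    have hsn : s < n := by omega
    rw [PySem.List.pyRange_one_cons hsn]
    have e1 : pvCombs (s :: PySem.List.pyRange (s + 1) n) 2
        = ((PySem.List.pyRange (s + 1) n).map fun y => [s, y])
          ++ pvCombs (PySem.List.pyRange (s + 1) n) 2 := by
      simp [pvCombs, pvCombs_one, List.map_map, Function.comp]
    rw [e1]
    have hlen : (PySem.List.pyRange (s + 1) n).length = (n - (s + 1)).toNat :=
      PySem.List.length_pyRange_one _ _
    by_cases hi : i = s
    · subst hi
      have hpz : (i - i) * (2 * n - i - i - 1) = 0 := by ring
      have hpv : (p : Int) = j - i - 1 := by rw [hpz] at hp; omega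
      have hplt : p < ((PySem.List.pyRange (i + 1) n).map fun y => [i, y]).length := by
        simp only [List.length_map, hlen]; omega
      rw [List.getElem?_append_left hplt, List.getElem?_map,
        PySem.List.getElem?_pyRange_one]
      have : p < (n - (i + 1)).toNat := by omega
      rw [if_pos this]
      have : i + 1 + (p : Int) = j := by omega
      simp [this]
    · have hsi1 : s + 1 ≤ i := by omega
      have key1 : (i - s) * (2 * n - s - i - 1)
          - (i - s - 1) * (2 * n - (s + 1) - i - 1) = 2 * (n - s - 1) := by ring
      have nn : 0 ≤ (i - s - 1) * (2 * n - (s + 1) - i - 1) :=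
        mul_nonneg (by omega) (by omega)
      have hji : (0 : Int) ≤ j - i - 1 := by omega
      have hgeI : (n - s - 1 : Int) ≤ (p : Int) := by linarith
      have hge : ((PySem.List.pyRange (s + 1) n).map fun y => [s, y]).length ≤ p := by
        simp only [List.length_map, hlen]; omega
      rw [List.getElem?_append_right hge]
      simp only [List.length_map, hlen]
      apply ih n (s + 1) i j (p - (n - (s + 1)).toNat) (by omega) hsi1 hij hjn
      have hcast : ((p - (n - (s + 1)).toNat : Nat) : Int) = (p : Int) - (n - s - 1) := by
        omega
      rw [hcast]
      nlinarith [hp, key1]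

-- the dict {edge: i for i, edge in enumerate(edges)} looks up the position
theorem dict_lookup (edges : List (List Int)) (hnd : edges.Nodup) (p : Nat) (e : List Int)
    (hp : edges[p]? = some e) :
    ((edges.zipIdx.map (fun q => ((q.2 : Int), q.1))).foldl (fun d q => d.insert q.2 q.1)
      (PySem.Dict.empty : PySem.Dict (List Int) Int)).getD e 0 = (p : Int) := by
  have hE : edges.zipIdx.map (fun q => ((q.2 : Int), q.1)) = PySem.List.enumerate edges 0 := by
    rw [PySem.List.enumerate_eq_zipIdx_map]; simp
  rw [hE]
  have hfresh : ∀ a ∈ PySem.List.enumerate edges 0,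
      (PySem.Dict.empty : PySem.Dict (List Int) Int).contains a.2 = false := by
    intro a _; simp [PySem.Dict.contains_empty]
  have hnodk : ((PySem.List.enumerate edges 0).map (fun q => q.2)).Nodup := by
    rw [PySem.List.map_snd_enumerate]; exact hnd
  have hitems := PySem.Dict.items_foldl_insert_fresh (PySem.List.enumerate edges 0)
    (fun q => q.2) (fun q => q.1) PySem.Dict.empty hfresh hnodk
  obtain ⟨hplen, hpe⟩ := List.getElem?_eq_some_iff.mp hp
  have hmem : (e, (p : Int)) ∈ ((List.foldl (fun d a => d.insert a.2 a.1)
      PySem.Dict.empty (PySem.List.enumerate edges 0)).items) := by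
    rw [hitems]
    have : ((p : Int), e) ∈ PySem.List.enumerate edges 0 := by
      rw [PySem.List.mem_enumerate_iff]
      exact ⟨p, hplen, by simp [hpe]⟩
    simpa [PySem.Dict.empty] using List.mem_map_of_mem (f := fun a => (a.2, a.1)) this
  apply PySem.Dict.getD_of_mem_items _ hmem
  show ((List.foldl (fun d a => d.insert a.2 a.1)
      PySem.Dict.empty (PySem.List.enumerate edges 0)).items.map (fun q => q.1)).Nodup
  rw [hitems]
  simpa [List.map_map, Function.comp_def, PySem.Dict.empty,
    PySem.List.map_snd_enumerate] using hnd

theorem nodup_pvCombs (xs : List Int) (k : Nat) (h : xs.Nodup) : (pvCombs xs k).Nodup := by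
  induction xs generalizing k with
  | nil =>
    match k with
    | 0 => simp [pvCombs]
    | _ + 1 => simp [pvCombs]
  | cons x rest ih =>
    match k with
    | 0 => simp [pvCombs]
    | k + 1 =>
      simp only [List.nodup_cons] at h
      refine List.Nodup.append ?_ (ih (k + 1) h.2) ?_
      · exact (ih k h.2).map (fun a b hab => by injection hab)
      · intro l hl1 hl2
        simp only [List.mem_map] at hl1
        obtain ⟨t, _, rfl⟩ := hl1
        have hsub := (mem_pvCombs hl2).1
        exact h.1 (hsub.subset (by simp))

-- ===== VERDICT (by name: the statement is the Claim_ definition above) =====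
theorem get_clique_edge_indices_spec : Claim_equal_get_clique_edge_indices := by
  intro n a _ _
  unfold Spec_get_clique_edge_indices get_clique_edge_indices get_clique_edge_indices_alt
  simp only [PySem.List.foldl_append_singleton_eq_map, List.nil_append]
  apply List.map_congr_left
  intro vs hvs
  apply List.map_congr_left
  intro e he
  obtain ⟨hesub, helen⟩ := mem_pvCombs he
  have hesubR : e.Sublist (PySem.List.pyRange 0 n) := hesub.trans (mem_pvCombs hvs).1
  match e, helen with
  | [i, j], _ =>
    have hpw : List.Pairwise (· < ·) [i, j] :=
      (PySem.List.pairwise_lt_pyRange_one 0 n).sublist hesubR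
    have hij : i < j := by simpa using hpw
    have hi := (PySem.List.mem_pyRange_one).mp (hesubR.subset (by simp : i ∈ [i, j]))
    have hj := (PySem.List.mem_pyRange_one).mp (hesubR.subset (by simp : j ∈ [i, j]))
    have hi0 : (0 : Int) ≤ i := by omega
    have hjn : j < n := by omega
    have hsort : PySem.List.sorted [i, j] (fun x => x) = [i, j] :=
      PySem.List.sorted_eq_of_perm_of_pairwise_lt _ _ _ (List.Perm.refl _) (by simpa using hij)
    rw [hsort]
    obtain ⟨c, hc⟩ := Int.even_mul_succ_self (i - 1)
    have hc' : i * (i - 1) = 2 * c := by linarith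
    have hfd : PySem.Int.floordiv (i * (i - 1)) 2 = c := by
      rw [PySem.Int.floordiv_eq_ediv_of_pos (by norm_num), hc']
      exact Int.mul_ediv_cancel_left c (by norm_num)
    have h2v : 2 * (i * (n - 1) - c + (j - i - 1))
        = (i - 0) * (2 * n - 0 - i - 1) + 2 * (j - i - 1) := by linarith [hc']
    have hvnn : (0 : Int) ≤ i * (n - 1) - c + (j - i - 1) := by
      have h1 : (0 : Int) ≤ (i - 0) * (2 * n - 0 - i - 1) :=
        mul_nonneg (by omega) (by omega)
      linarith
    set v : Int := i * (n - 1) - c + (j - i - 1) with hv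
    have hcast : ((v.toNat : Nat) : Int) = v := Int.toNat_of_nonneg hvnn
    have hpos := pvCombs_two_pos n.toNat n 0 i j v.toNat (by omega) hi0 hij hjn
      (by rw [hcast]; exact h2v)
    have hlook := dict_lookup (pvCombs (PySem.List.pyRange 0 n) 2)
      (nodup_pvCombs _ _ (PySem.List.nodup_pyRange_one 0 n)) v.toNat [i, j] hpos
    rw [hlook, hcast]
    show v = i * (n - 1) - PySem.Int.floordiv (i * (i - 1)) 2 + (j - i - 1)
    rw [hfd, hv]
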